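-- pv_equiv track=rewrite | github.com/mshalvagal/adventofcode2025 | day8/day8b.py | reduce_circuit
-- ===== SOURCE A (Python) =====
-- def reduce_circuit(circuits):
--     merged_circuits = []
--     while len(circuits) > 0:
--         first, *rest = circuits
--         first = set(first)
--         changed = True
--         while changed:
--             changed = False
--             for other in rest[:]:
--                 if len(first.intersection(set(other))) > 0:
--                     first.update(other)
--                     rest.remove(other)
--                     changed = True
--         merged_circuits.append(first)
--         circuits = rest
--     return merged_circuits
-- ===== SOURCE B (Python) =====
-- def reduce_circuit(circuits):
--     # One up-front conversion of every circuit to a set, then repeated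
--     # one-sweep partitions (absorbed vs kept) instead of snapshot
--     # iteration with in-place list.remove and per-pass set() rebuilding.
--     merged = []
--     rest = [set(c) for c in circuits]
--     while rest:
--         comp, rest = rest[0], rest[1:]
--         while True:
--             kept = []
--             for s in rest:
--                 if comp.isdisjoint(s):
--                     kept.append(s)
--                 else:
--                     comp |= s
--             if len(kept) == len(rest):
--                 break
--             rest = kept
--         merged.append(comp)
--     return merged
-- ===== Notes on version B (the rewrite author's own statement) =====
-- stated objective: alternative
-- what changed: B converts every circuit to a set once up front and grows each component by repeated single-sweep partitions into kept/absorbed lists, replacing A's per-pass snapshot copies, per-comparison set(other) rebuilds and in-place list.remove calls.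
import Mathlib
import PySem

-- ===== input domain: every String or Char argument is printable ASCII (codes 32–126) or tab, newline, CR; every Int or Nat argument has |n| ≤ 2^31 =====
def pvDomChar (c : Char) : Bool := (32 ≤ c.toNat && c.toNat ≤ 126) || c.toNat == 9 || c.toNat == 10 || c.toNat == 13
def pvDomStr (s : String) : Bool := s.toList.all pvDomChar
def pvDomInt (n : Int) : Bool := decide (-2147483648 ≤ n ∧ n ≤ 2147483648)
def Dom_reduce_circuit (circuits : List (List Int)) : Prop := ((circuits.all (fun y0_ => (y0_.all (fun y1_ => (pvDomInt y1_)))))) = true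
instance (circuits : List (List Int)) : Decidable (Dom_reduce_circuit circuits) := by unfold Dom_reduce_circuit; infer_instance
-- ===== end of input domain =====

-- B replaces A's per-pass snapshot copies, per-comparison set(other) rebuilds and
-- in-place list.remove calls by one up-front set conversion and one-sweep partitions
-- into kept/absorbed lists (objective: alternative).

-- ===== PORT A =====
-- `len(first.intersection(set(other))) > 0`
def interA (first : PySem.Set Int) (other : List Int) : Bool :=
  decide (0 < PySem.Set.len (PySem.Set.inter first (PySem.Set.ofList other)))

-- the `for other in rest[:]` loop: todo is the snapshot, r the live rest list
def passAgo (c : PySem.Set Int) (r : List (List Int)) (ch : Bool) :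
    List (List Int) → PySem.Set Int × List (List Int) × Bool
  | [] => (c, r, ch)
  | o :: todo =>
      if interA c o then
        -- `rest.remove(other)` never raises here (other was drawn from a snapshot of rest)
        passAgo (PySem.Set.update c o) ((PySem.List.remove? r o).getD r) true todo
      else
        passAgo c r ch todo

-- `changed = True; while changed: …` — fuel r.length+1 suffices: every pass that sets
-- changed removes at least one element of rest (proved in passAgo_len below)
def loopA : Nat → PySem.Set Int → List (List Int) → PySem.Set Int × List (List Int)
  | 0, c, r => (c, r)
  | fuel + 1, c, r =>
      let res := passAgo c r false r
      if res.2.2 then loopA fuel res.1 res.2.1 else (res.1, res.2.1)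

-- `while len(circuits) > 0: first, *rest = circuits; …` — fuel circuits.length suffices:
-- each iteration consumes at least one circuit (proved in loopA_len below)
def reduceGo : Nat → List (List Int) → List (List Int)
  | 0, _ => []
  | fuel + 1, circuits =>
      match circuits with
      | [] => []
      | first :: rest =>
          let res := loopA (rest.length + 1) (PySem.Set.ofList first) rest
          res.1 :: reduceGo fuel res.2

def reduce_circuit (circuits : List (List Int)) : List (List Int) :=
  reduceGo circuits.length circuits

-- ===== PORT B =====
-- one sweep: `for s in rest: if comp.isdisjoint(s): kept.append(s) else: comp |= s`
def sweepgo (c : PySem.Set Int) (kept : List (PySem.Set Int)) :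
    List (PySem.Set Int) → PySem.Set Int × List (PySem.Set Int)
  | [] => (c, kept)
  | s :: todo =>
      if PySem.Set.isdisjoint c s then sweepgo c (kept ++ [s]) todo
      else sweepgo (PySem.Set.update c s) kept todo

-- `while True: … if len(kept) == len(rest): break; rest = kept` — fuel rest.length+1
-- suffices: every sweep that does not break shortens rest (see sweepgo_len below)
def loopB : Nat → PySem.Set Int → List (PySem.Set Int) → PySem.Set Int × List (PySem.Set Int)
  | 0, c, rest => (c, rest)
  | fuel + 1, c, rest =>
      let res := sweepgo c [] rest
      if res.2.length = rest.length then (res.1, rest) else loopB fuel res.1 res.2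

-- `while rest: comp, rest = rest[0], rest[1:]; …` — fuel = number of circuits
def goB : Nat → List (PySem.Set Int) → List (PySem.Set Int)
  | 0, _ => []
  | fuel + 1, l =>
      match l with
      | [] => []
      | s :: rest =>
          let res := loopB (rest.length + 1) s rest
          res.1 :: goB fuel res.2

def reduce_circuit_alt (circuits : List (List Int)) : List (List Int) :=
  goB (circuits.map PySem.Set.ofList).length (circuits.map PySem.Set.ofList)

-- ===== PRECONDITION & SPEC =====
def Spec_reduce_circuit (circuits : List (List Int)) (out : List (List Int)) : Prop := out = reduce_circuit_alt circuits
instance (circuits : List (List Int)) (out : List (List Int)) : Decidable (Spec_reduce_circuit circuits out) := by unfold Spec_reduce_circuit; infer_instance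

-- ===== CLAIM (what is proved, stated in full; the proofs are below) =====
def Claim_equal_reduce_circuit : Prop := ∀ (circuits : List (List Int)), Dom_reduce_circuit circuits → Spec_reduce_circuit circuits (reduce_circuit circuits)

-- ===== LEMMAS AND PROOFS =====

-- a circuit that is a nonempty subset of cF: absorbing it can no longer change the component
def junkC (cF : List Int) (s : List Int) : Bool := !s.isEmpty && s.all (fun x => decide (x ∈ cF))

theorem passAgo_len (todo : List (List Int)) : ∀ (c : PySem.Set Int) (r : List (List Int)) (ch : Bool),
    (∀ o, todo.count o ≤ r.count o) →
    (passAgo c r ch todo).2.1.length ≤ r.length ∧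
      ((passAgo c r ch todo).2.2 = true → ch = true ∨ (passAgo c r ch todo).2.1.length < r.length) := by
  induction todo with
  | nil => intro c r ch h; simp [passAgo]
  | cons o t ih =>
      intro c r ch h
      by_cases hI : interA c o = true
      · have ho : o ∈ r := by
          have := h o
          simp [List.count_cons_self] at this
          exact List.count_pos_iff.mp (by omega)
        have hrm : (PySem.List.remove? r o).getD r = r.erase o := by
          rw [PySem.List.remove?_eq_some_erase r o ho]; rfl
        have hcnt : ∀ o', t.count o' ≤ (r.erase o).count o' := by
          intro o'
          have h1 := h o'
          rw [List.count_cons] at h1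
          rw [List.count_erase]
          by_cases he : o' = o
          · subst he; simp at h1 ⊢; omega
          · simp [Ne.symm he] at h1 ⊢; omega
        have hlt : (r.erase o).length < r.length := by
          rw [List.length_erase_of_mem ho]
          have : r ≠ [] := by intro e; subst e; simp at ho
          cases r <;> simp_all
        have := ih (PySem.Set.update c o) (r.erase o) true hcnt
        simp only [passAgo, hI, if_true, hrm]
        exact ⟨le_trans this.1 (le_of_lt hlt), fun _ => Or.inr (lt_of_le_of_lt this.1 hlt)⟩
      · have hcnt : ∀ o', t.count o' ≤ r.count o' := by
          intro o'
          have h1 := h o'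
          rw [List.count_cons] at h1
          split at h1 <;> omega
        simp only [passAgo, hI, if_false, Bool.false_eq_true]
        exact ih c r ch hcnt

theorem sweepgo_len (todo : List (PySem.Set Int)) : ∀ (c : PySem.Set Int) (kept : List (PySem.Set Int)),
    (sweepgo c kept todo).2.length ≤ kept.length + todo.length := by
  induction todo with
  | nil => intro c kept; simp [sweepgo]
  | cons s t ih =>
      intro c kept
      simp only [sweepgo]
      split
      · have := ih c (kept ++ [s]); simp at this; simpa [Nat.add_comm, Nat.add_left_comm] using this
      · have := ih (PySem.Set.update c s) kept; simp; omega

theorem loopA_len (fuel : Nat) : ∀ (c : PySem.Set Int) (r : List (List Int)),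
    (loopA fuel c r).2.length ≤ r.length := by
  induction fuel with
  | zero => intro c r; exact le_refl _
  | succ fuel ih =>
      intro c r
      simp only [loopA]
      split
      · exact le_trans (ih _ _) (passAgo_len r c r false (fun o => le_refl _)).1
      · exact (passAgo_len r c r false (fun o => le_refl _)).1

theorem interA_true_iff (c : PySem.Set Int) (o : List Int) :
    interA c o = true ↔ ∃ x, x ∈ c ∧ x ∈ o := by
  unfold interA
  rw [decide_eq_true_iff]
  constructor
  · intro h
    have hne : PySem.Set.inter c (PySem.Set.ofList o) ≠ [] := by
      intro e
      simp [PySem.Set.len, e] at h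
    obtain ⟨x, hx⟩ := List.exists_mem_of_ne_nil _ hne
    rw [PySem.Set.mem_inter] at hx
    exact ⟨x, hx.1, (PySem.Set.mem_ofList _ _).mp hx.2⟩
  · rintro ⟨x, hc, ho⟩
    have hx : x ∈ PySem.Set.inter c (PySem.Set.ofList o) :=
      (PySem.Set.mem_inter _ _ _).mpr ⟨hc, (PySem.Set.mem_ofList _ _).mpr ho⟩
    have : PySem.Set.inter c (PySem.Set.ofList o) ≠ [] := by
      intro e; rw [e] at hx; simp at hx
    simp [PySem.Set.len]
    cases h : PySem.Set.inter c (PySem.Set.ofList o) with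
    | nil => exact absurd h this
    | cons a t => simp
  

theorem interA_eq_not_disj (c : PySem.Set Int) (o : List Int) :
    interA c o = !PySem.Set.isdisjoint c (PySem.Set.ofList o) := by
  cases hd : PySem.Set.isdisjoint c (PySem.Set.ofList o) with
  | true =>
      simp only [Bool.not_true]
      rw [← Bool.not_eq_true]
      intro hI
      obtain ⟨x, hc, ho⟩ := (interA_true_iff c o).mp hI
      exact (PySem.Set.isdisjoint_iff _ _).mp hd x hc ((PySem.Set.mem_ofList _ _).mpr ho)
  | false =>
      simp only [Bool.not_false]
      rw [interA_true_iff]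
      by_contra hne
      push_neg at hne
      have : PySem.Set.isdisjoint c (PySem.Set.ofList o) = true := by
        rw [PySem.Set.isdisjoint_iff]
        intro x hx hxo
        exact hne x hx ((PySem.Set.mem_ofList _ _).mp hxo)
      rw [this] at hd; exact Bool.true_eq_false.mp hd
  

theorem update_ofList (c : PySem.Set Int) (o : List Int) :
    PySem.Set.update c (PySem.Set.ofList o) = PySem.Set.update c o := by
  rw [PySem.Set.update_eq_append_filter, PySem.Set.update_eq_append_filter, PySem.Set.ofList_ofList]

theorem update_subset_eq (c : PySem.Set Int) (s : List Int) (h : ∀ x ∈ s, x ∈ c) :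
    PySem.Set.update c s = c := by
  rw [PySem.Set.update_eq_append_filter]
  have : List.filter (fun y => !c.contains y) (PySem.Set.ofList s) = [] := by
    rw [List.filter_eq_nil_iff]
    intro y hy
    have hyc : y ∈ c := h y ((PySem.Set.mem_ofList _ _).mp hy)
    have hc : PySem.Set.contains c y = true := (PySem.Set.contains_iff _ _).mpr hyc
    simp [hc]
    exact hyc
  rw [this, List.append_nil]

theorem mem_update_left (c : PySem.Set Int) (s : List Int) (x : Int) (h : x ∈ c) :
    x ∈ PySem.Set.update c s := (PySem.Set.mem_update _ _ _).mpr (Or.inl h)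

theorem junkC_ofList (cF : List Int) (o : List Int) : junkC cF (PySem.Set.ofList o) = junkC cF o := by
  unfold junkC
  have he : (PySem.Set.ofList o).isEmpty = o.isEmpty := by
    rw [Bool.eq_iff_iff, List.isEmpty_iff, List.isEmpty_iff]
    constructor
    · intro h
      cases o with
      | nil => rfl
      | cons a t =>
          have : a ∈ PySem.Set.ofList (a :: t) := (PySem.Set.mem_ofList _ _).mpr (by simp)
          rw [h] at this; simp at this
    · intro h; rw [h]; rfl
  have ha : ((PySem.Set.ofList o).all fun x => decide (x ∈ cF)) = (o.all fun x => decide (x ∈ cF)) := by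
    rw [Bool.eq_iff_iff, List.all_eq_true, List.all_eq_true]
    constructor
    · intro h x hx; exact h x ((PySem.Set.mem_ofList _ _).mpr hx)
    · intro h x hx; exact h x ((PySem.Set.mem_ofList _ _).mp hx)
  rw [he, ha]

theorem filter_erase_of_neg {p : List Int → Bool} (r : List (List Int)) (o : List Int)
    (hp : p o = false) : (r.erase o).filter p = r.filter p := by
  induction r with
  | nil => rfl
  | cons a t ih =>
      by_cases ha : a = o
      · subst ha
        rw [List.erase_cons_head]
        simp [List.filter_cons, hp]
      · rw [List.erase_cons_tail (by simp [ha])]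
        simp only [List.filter_cons]
        split
        · rw [ih]
        · exact ih

theorem sweep_mono (todo : List (PySem.Set Int)) : ∀ (c : PySem.Set Int) (kept : List (PySem.Set Int)) (x : Int),
    x ∈ c → x ∈ (sweepgo c kept todo).1 := by
  induction todo with
  | nil => intro c kept x h; simpa [sweepgo] using h
  | cons s t ih =>
      intro c kept x h
      simp only [sweepgo]
      split
      · exact ih c (kept ++ [s]) x h
      · exact ih (PySem.Set.update c s) kept x (mem_update_left _ _ _ h)

theorem pass_mono (todo : List (List Int)) : ∀ (c : PySem.Set Int) (r : List (List Int)) (ch : Bool) (x : Int),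
    x ∈ c → x ∈ (passAgo c r ch todo).1 := by
  induction todo with
  | nil => intro c r ch x h; simpa [passAgo] using h
  | cons o t ih =>
      intro c r ch x h
      simp only [passAgo]
      split
      · exact ih _ _ _ x (mem_update_left _ _ _ h)
      · exact ih c r ch x h

theorem junkC_spec (c0 s : List Int) : junkC c0 s = true ↔ (s ≠ [] ∧ ∀ x ∈ s, x ∈ c0) := by
  unfold junkC
  simp [List.isEmpty_iff, List.all_eq_true]

theorem disj_false_of_junk (c : PySem.Set Int) (c0 s : List Int)
    (hsub0 : ∀ x ∈ c0, x ∈ c) (hj : junkC c0 s = true) : PySem.Set.isdisjoint c s = false := by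
  obtain ⟨hne, hs⟩ := (junkC_spec c0 s).mp hj
  have hsub : ∀ x ∈ s, x ∈ c := fun x hx => hsub0 x (hs x hx)
  cases hdd : PySem.Set.isdisjoint c s with
  | false => rfl
  | true =>
      obtain ⟨x, hx⟩ := List.exists_mem_of_ne_nil s hne
      exact absurd ((PySem.Set.isdisjoint_iff _ _).mp hdd x (hsub x hx)) (by simp [hx])

theorem sweep_filter_junk (todo : List (PySem.Set Int)) : ∀ (c : PySem.Set Int) (kept : List (PySem.Set Int)) (c0 : List Int),
    (∀ x ∈ c0, x ∈ c) → sweepgo c kept todo = sweepgo c kept (todo.filter (fun s => !junkC c0 s)) := by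
  induction todo with
  | nil => intro c kept c0 h; rfl
  | cons s t ih =>
      intro c kept c0 h
      by_cases hj : junkC c0 s = true
      · have hd := disj_false_of_junk c c0 s h hj
        have hsub : ∀ x ∈ s, x ∈ c := fun x hx => h x (((junkC_spec c0 s).mp hj).2 x hx)
        rw [List.filter_cons_of_neg (by simp [hj])]
        simp only [sweepgo]
        rw [if_neg (by simp [hd])]
        rw [update_subset_eq c s hsub]
        exact ih c kept c0 h
      · rw [List.filter_cons_of_pos (by simp [hj])]
        simp only [sweepgo]
        split
        · exact ih c (kept ++ [s]) c0 h
        · exact ih (PySem.Set.update c s) kept c0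
            (fun x hx => mem_update_left _ _ _ (h x hx))

theorem sweep_kept_filter (todo : List (PySem.Set Int)) : ∀ (c : PySem.Set Int) (kept : List (PySem.Set Int)) (cF : List Int),
    (∀ x ∈ (sweepgo c kept todo).1, x ∈ cF) →
    ((sweepgo c kept todo).2).filter (fun s => !junkC cF s) = (kept ++ todo).filter (fun s => !junkC cF s) := by
  induction todo with
  | nil => intro c kept cF h; simp [sweepgo]
  | cons s t ih =>
      intro c kept cF h
      simp only [sweepgo]
      cases hd : PySem.Set.isdisjoint c s with
      | true =>
          rw [if_pos (by simp [hd])]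
          have := ih c (kept ++ [s]) cF (by
            intro x hx
            apply h
            simpa only [sweepgo, hd, if_pos] using hx)
          rw [this, List.append_assoc]
          rfl
      | false =>
          rw [if_neg (by simp [hd])]
          have hcomp : ∀ x ∈ (sweepgo (PySem.Set.update c s) kept t).1, x ∈ cF := by
            intro x hx
            apply h
            simpa only [sweepgo, hd, if_neg] using hx
          have hj : junkC cF s = true := by
            rw [junkC_spec]
            constructor
            · intro e
              subst e
              have : PySem.Set.isdisjoint c ([] : List Int) = true := by
                rw [PySem.Set.isdisjoint_iff]; intro x _ hx; simp at hx
              rw [this] at hd; exact Bool.true_eq_false.mp hd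
            · intro x hx
              apply hcomp
              apply sweep_mono
              exact (PySem.Set.mem_update _ _ _).mpr (Or.inr hx)
          have := ih (PySem.Set.update c s) kept cF hcomp
          rw [this]
          rw [List.filter_append, List.filter_append, List.filter_cons_of_neg (by simp [hj])]

theorem sweep_all_disjoint (todo : List (PySem.Set Int)) : ∀ (c : PySem.Set Int) (kept : List (PySem.Set Int)),
    (∀ s ∈ todo, PySem.Set.isdisjoint c s = true) → sweepgo c kept todo = (c, kept ++ todo) := by
  induction todo with
  | nil => intro c kept h; simp [sweepgo]
  | cons s t ih =>
      intro c kept h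
      simp only [sweepgo]
      rw [if_pos (by simp [h s (by simp)])]
      rw [ih c (kept ++ [s]) (fun s' hs' => h s' (by simp [hs']))]
      rw [List.append_assoc]
      rfl

theorem pass_ch_true (todo : List (List Int)) : ∀ (c : PySem.Set Int) (r : List (List Int)),
    (passAgo c r true todo).2.2 = true := by
  induction todo with
  | nil => intro c r; rfl
  | cons o t ih =>
      intro c r
      simp only [passAgo]
      split
      · exact ih _ _
      · exact ih c r

theorem pass_false (todo : List (List Int)) : ∀ (c : PySem.Set Int) (r : List (List Int)) (ch : Bool),
    (passAgo c r ch todo).2.2 = false →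
    passAgo c r ch todo = (c, r, ch) ∧ ∀ o ∈ todo, interA c o = false := by
  induction todo with
  | nil => intro c r ch h; exact ⟨rfl, by simp⟩
  | cons o t ih =>
      intro c r ch h
      cases hI : interA c o with
      | true =>
          exfalso
          simp only [passAgo, hI, if_pos] at h
          rw [pass_ch_true] at h
          exact Bool.true_eq_false.mp h
      | false =>
          simp only [passAgo, hI, Bool.false_eq_true, reduceIte] at h ⊢
          obtain ⟨h1, h2⟩ := ih c r ch h
          exact ⟨h1, by
            intro o' ho'
            rcases List.mem_cons.mp ho' with he | ht
            · subst he; exact hI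
            · exact h2 o' ht⟩

theorem counts_tail {o : List Int} {t r : List (List Int)}
    (h : ∀ o', List.count o' (o :: t) ≤ List.count o' r) : ∀ o', List.count o' t ≤ List.count o' r := by
  intro o'
  have h1 := h o'
  rw [List.count_cons] at h1
  split at h1 <;> omega

theorem counts_head_mem {o : List Int} {t r : List (List Int)}
    (h : ∀ o', List.count o' (o :: t) ≤ List.count o' r) : o ∈ r := by
  have h1 := h o
  simp [List.count_cons] at h1
  exact List.count_pos_iff.mp (by omega)

theorem counts_erase {o : List Int} {t r : List (List Int)}
    (h : ∀ o', List.count o' (o :: t) ≤ List.count o' r) :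
    ∀ o', List.count o' t ≤ List.count o' (r.erase o) := by
  intro o'
  have h1 := h o'
  rw [List.count_cons] at h1
  rw [List.count_erase]
  by_cases he : o' = o
  · subst he; simp at h1 ⊢; omega
  · simp [he, Ne.symm he] at h1 ⊢; omega

theorem remove_getD_eq_erase {o : List Int} {r : List (List Int)} (ho : o ∈ r) :
    (PySem.List.remove? r o).getD r = r.erase o := by
  rw [PySem.List.remove?_eq_some_erase r o ho]; rfl

theorem disj_of_interA_false {c : PySem.Set Int} {o : List Int} (hI : interA c o = false) :
    PySem.Set.isdisjoint c (PySem.Set.ofList o) = true := by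
  have h2 := interA_eq_not_disj c o
  rw [hI] at h2
  cases hdd : PySem.Set.isdisjoint c (PySem.Set.ofList o) with
  | true => rfl
  | false => rw [hdd] at h2; simp at h2

theorem disj_of_interA_true {c : PySem.Set Int} {o : List Int} (hI : interA c o = true) :
    PySem.Set.isdisjoint c (PySem.Set.ofList o) = false := by
  have h2 := interA_eq_not_disj c o
  rw [hI] at h2
  cases hdd : PySem.Set.isdisjoint c (PySem.Set.ofList o) with
  | false => rfl
  | true => rw [hdd] at h2; simp at h2

theorem pass_comp (todo : List (List Int)) : ∀ (c : PySem.Set Int) (r : List (List Int)) (ch : Bool) (kept0 : List (PySem.Set Int)),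
    (passAgo c r ch todo).1 = (sweepgo c kept0 (todo.map PySem.Set.ofList)).1 := by
  induction todo with
  | nil => intro c r ch kept0; rfl
  | cons o t ih =>
      intro c r ch kept0
      simp only [List.map_cons, sweepgo]
      cases hI : interA c o with
      | false =>
          simp only [passAgo, hI, Bool.false_eq_true, reduceIte]
          rw [if_pos (disj_of_interA_false hI)]
          exact ih c r ch (kept0 ++ [PySem.Set.ofList o])
      | true =>
          simp only [passAgo, hI, reduceIte]
          rw [if_neg (by simp [disj_of_interA_true hI])]
          rw [update_ofList]
          exact ih _ _ true kept0

theorem pass_ch (todo : List (List Int)) : ∀ (c : PySem.Set Int) (r : List (List Int)) (ch : Bool) (kept0 : List (PySem.Set Int)),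
    ((passAgo c r ch todo).2.2 = true ↔
      (ch = true ∨ (sweepgo c kept0 (todo.map PySem.Set.ofList)).2.length ≠ kept0.length + todo.length)) := by
  induction todo with
  | nil => intro c r ch kept0; simp [passAgo, sweepgo]
  | cons o t ih =>
      intro c r ch kept0
      simp only [List.map_cons, sweepgo, List.length_cons]
      cases hI : interA c o with
      | false =>
          have hd := disj_of_interA_false hI
          simp only [passAgo, hI, Bool.false_eq_true, reduceIte]
          rw [if_pos hd]
          rw [ih c r ch (kept0 ++ [PySem.Set.ofList o])]
          have harith : (kept0 ++ [PySem.Set.ofList o]).length + t.length = kept0.length + (t.length + 1) := by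
            simp; omega
          rw [harith]
      | true =>
          simp only [passAgo, hI, reduceIte]
          rw [if_neg (by simp [disj_of_interA_true hI])]
          rw [update_ofList, pass_ch_true]
          have hlen := sweepgo_len (t.map PySem.Set.ofList) (PySem.Set.update c o) kept0
          simp only [List.length_map] at hlen
          constructor
          · intro _
            right
            omega
          · intro _
            rfl

theorem pass_perm (todo : List (List Int)) : ∀ (c : PySem.Set Int) (r : List (List Int)) (ch : Bool) (kept0 : List (PySem.Set Int)),
    (∀ o, todo.count o ≤ r.count o) →
    ((passAgo c r ch todo).2.1.map PySem.Set.ofList ++ kept0 ++ todo.map PySem.Set.ofList).Perm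
      (r.map PySem.Set.ofList ++ (sweepgo c kept0 (todo.map PySem.Set.ofList)).2) := by
  induction todo with
  | nil =>
      intro c r ch kept0 h
      simp only [passAgo, sweepgo, List.map_nil, List.append_nil]
      exact List.Perm.refl _
  | cons o t ih =>
      intro c r ch kept0 h
      simp only [List.map_cons, sweepgo]
      cases hI : interA c o with
      | false =>
          simp only [passAgo, hI, Bool.false_eq_true, reduceIte]
          rw [if_pos (disj_of_interA_false hI)]
          have := ih c r ch (kept0 ++ [PySem.Set.ofList o]) (counts_tail h)
          simpa [List.append_assoc] using this
      | true =>
          have ho : o ∈ r := counts_head_mem h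
          simp only [passAgo, hI, reduceIte]
          rw [if_neg (by simp [disj_of_interA_true hI])]
          rw [update_ofList, remove_getD_eq_erase ho]
          have IH := ih (PySem.Set.update c o) (r.erase o) true kept0 (counts_erase h)
          have hpermr : (r.map PySem.Set.ofList).Perm
              (PySem.Set.ofList o :: (r.erase o).map PySem.Set.ofList) := by
            have := (List.perm_cons_erase ho).map PySem.Set.ofList
            simpa using this
          have h1 : ((passAgo (PySem.Set.update c o) (r.erase o) true t).2.1.map PySem.Set.ofList ++ kept0 ++
                (PySem.Set.ofList o :: t.map PySem.Set.ofList)).Perm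
              (PySem.Set.ofList o :: ((passAgo (PySem.Set.update c o) (r.erase o) true t).2.1.map PySem.Set.ofList ++ kept0 ++
                t.map PySem.Set.ofList)) := by
            have := List.perm_middle (a := PySem.Set.ofList o)
              (l₁ := (passAgo (PySem.Set.update c o) (r.erase o) true t).2.1.map PySem.Set.ofList ++ kept0)
              (l₂ := t.map PySem.Set.ofList)
            simpa [List.append_assoc] using this
          have h2 := IH.cons (PySem.Set.ofList o)
          have h3 : (PySem.Set.ofList o :: ((r.erase o).map PySem.Set.ofList ++
                (sweepgo (PySem.Set.update c o) kept0 (t.map PySem.Set.ofList)).2)).Perm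
              (r.map PySem.Set.ofList ++ (sweepgo (PySem.Set.update c o) kept0 (t.map PySem.Set.ofList)).2) := by
            have h4 := hpermr.symm.append_right
              ((sweepgo (PySem.Set.update c o) kept0 (t.map PySem.Set.ofList)).2)
            simpa using h4
          exact (h1.trans h2).trans h3

theorem pass_filter (todo : List (List Int)) : ∀ (c : PySem.Set Int) (r : List (List Int)) (ch : Bool) (cF : List Int),
    (∀ o, todo.count o ≤ r.count o) →
    (∀ x ∈ (passAgo c r ch todo).1, x ∈ cF) →
    ((passAgo c r ch todo).2.1).filter (fun o => !junkC cF o) = r.filter (fun o => !junkC cF o) := by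
  induction todo with
  | nil => intro c r ch cF h hcF; rfl
  | cons o t ih =>
      intro c r ch cF h hcF
      cases hI : interA c o with
      | false =>
          simp only [passAgo, hI, Bool.false_eq_true, reduceIte] at hcF ⊢
          exact ih c r ch cF (counts_tail h) hcF
      | true =>
          have ho : o ∈ r := counts_head_mem h
          simp only [passAgo, hI, reduceIte, remove_getD_eq_erase ho] at hcF ⊢
          have hj : junkC cF o = true := by
            rw [junkC_spec]
            obtain ⟨x, hxc, hxo⟩ := (interA_true_iff c o).mp hI
            refine ⟨by rintro rfl; simp at hxo, ?_⟩
            intro y hy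
            apply hcF
            apply pass_mono
            exact (PySem.Set.mem_update _ _ _).mpr (Or.inr hy)
          rw [ih (PySem.Set.update c o) (r.erase o) true cF (counts_erase h) hcF]
          exact filter_erase_of_neg r o (by simp [hj])

theorem loop_sync (fA : Nat) : ∀ (fB : Nat) (c : PySem.Set Int) (rA : List (List Int)) (lB : List (PySem.Set Int)),
    rA.length < fA → lB.length < fB →
    (rA.map PySem.Set.ofList).Perm lB →
    (rA.map PySem.Set.ofList).filter (fun s => !junkC c s) = lB.filter (fun s => !junkC c s) →
    loopB fB c lB = ((loopA fA c rA).1, (loopA fA c rA).2.map PySem.Set.ofList) := by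
  induction fA with
  | zero => intro fB c rA lB hfa; exact absurd hfa (Nat.not_lt_zero _)
  | succ fA ih =>
      intro fB c rA lB hfa hfb hperm hfil
      cases fB with
      | zero => exact absurd hfb (Nat.not_lt_zero _)
      | succ fB =>
          have hswB : sweepgo c [] lB = sweepgo c [] (rA.map PySem.Set.ofList) := by
            rw [sweep_filter_junk lB c [] c (fun x hx => hx),
                ← hfil, ← sweep_filter_junk (rA.map PySem.Set.ofList) c [] c (fun x hx => hx)]
          have hlenB : lB.length = rA.length := by
            have := hperm.length_eq; simp at this; omega
          cases hch : (passAgo c rA false rA).2.2 with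
          | false =>
              obtain ⟨heq, hno⟩ := pass_false rA c rA false hch
              have hdisj : ∀ s ∈ lB, PySem.Set.isdisjoint c s = true := by
                intro s hs
                have hsm : s ∈ rA.map PySem.Set.ofList := hperm.mem_iff.mpr hs
                obtain ⟨o, hom, rfl⟩ := List.mem_map.mp hsm
                exact disj_of_interA_false (hno o hom)
              have hsweep : sweepgo c [] lB = (c, lB) := by
                have := sweep_all_disjoint lB c [] hdisj
                simpa using this
              have hAnj : ∀ s ∈ rA.map PySem.Set.ofList, (!junkC c s) = true := by
                intro s hsm
                obtain ⟨o, hom, rfl⟩ := List.mem_map.mp hsm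
                rw [junkC_ofList]
                by_contra hb
                simp only [Bool.not_eq_true', Bool.not_eq_false] at hb
                obtain ⟨hne, hsub⟩ := (junkC_spec c o).mp hb
                obtain ⟨x, hx⟩ := List.exists_mem_of_ne_nil o hne
                have hIt : interA c o = true := (interA_true_iff c o).mpr ⟨x, hsub x hx, hx⟩
                rw [hno o hom] at hIt
                exact Bool.false_eq_true.mp hIt
              have hBnj : ∀ s ∈ lB, (!junkC c s) = true := fun s hs => hAnj s (hperm.mem_iff.mpr hs)
              have hlb : lB = rA.map PySem.Set.ofList := by
                have e1 : (rA.map PySem.Set.ofList).filter (fun s => !junkC c s) = rA.map PySem.Set.ofList :=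
                  List.filter_eq_self.mpr hAnj
                have e2 : lB.filter (fun s => !junkC c s) = lB := List.filter_eq_self.mpr hBnj
                rw [← e2, ← hfil, e1]
              simp only [loopB, loopA]
              rw [if_pos (by rw [hsweep])]
              rw [if_neg (by rw [hch]; simp)]
              rw [hsweep, heq, hlb]
          | true =>
              have hp := passAgo_len rA c rA false (fun o => le_refl _)
              have hlt : (passAgo c rA false rA).2.1.length < rA.length := by
                rcases hp.2 hch with h' | h'
                · exact absurd h' (by simp)
                · exact h'
              have hne : ¬ (sweepgo c [] lB).2.length = lB.length := by
                rw [hswB, hlenB]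
                rcases (pass_ch rA c rA false []).mp hch with h' | h'
                · simp at h'
                · simpa using h'
              have hkb : (sweepgo c [] (rA.map PySem.Set.ofList)).2.length < lB.length := by
                have hk := sweepgo_len (rA.map PySem.Set.ofList) c []
                rw [hswB, hlenB] at hne
                simp only [List.length_nil, Nat.zero_add, List.length_map] at hk
                omega
              simp only [loopB, loopA]
              rw [if_neg hne]
              rw [if_pos hch]
              rw [hswB]
              have hcomp := pass_comp rA c rA false ([] : List (PySem.Set Int))
              rw [← hcomp]
              apply ih
              · omega
              · omega
              · have hpp := pass_perm rA c rA false [] (fun o => le_refl _)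
                simp only [List.append_nil] at hpp
                have hpp2 := hpp.trans (List.perm_append_comm)
                exact (List.perm_append_right_iff _).mp hpp2
              · have hfilA := pass_filter rA c rA false (passAgo c rA false rA).1 (fun o => le_refl _) (fun x hx => hx)
                have hfun : ((fun s => !junkC (passAgo c rA false rA).1 s) ∘ PySem.Set.ofList) =
                    (fun o => !junkC (passAgo c rA false rA).1 o) := by
                  funext o; simp [Function.comp, junkC_ofList]
                have hmapA : ((passAgo c rA false rA).2.1.map PySem.Set.ofList).filter (fun s => !junkC (passAgo c rA false rA).1 s)
                    = (rA.map PySem.Set.ofList).filter (fun s => !junkC (passAgo c rA false rA).1 s) := by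
                  rw [List.filter_map, List.filter_map, hfun, hfilA]
                have hswk := sweep_kept_filter (rA.map PySem.Set.ofList) c [] (passAgo c rA false rA).1 (by
                  intro x hx
                  exact hcomp ▸ hx)
                rw [hmapA, hswk]
                simp

theorem go_sync (fuel : Nat) : ∀ (rA : List (List Int)), rA.length ≤ fuel →
    goB fuel (rA.map PySem.Set.ofList) = reduceGo fuel rA := by
  induction fuel with
  | zero => intro rA h; rfl
  | succ fuel ih =>
      intro rA hlen
      cases rA with
      | nil => rfl
      | cons first rest =>
          simp only [List.map_cons, goB, reduceGo, List.length_map]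
          have hsync := loop_sync (rest.length + 1) (rest.length + 1) (PySem.Set.ofList first) rest
            (rest.map PySem.Set.ofList) (by omega) (by simp) (List.Perm.refl _) rfl
          rw [hsync]
          have hrest : (loopA (rest.length + 1) (PySem.Set.ofList first) rest).2.length ≤ fuel := by
            have := loopA_len (rest.length + 1) (PySem.Set.ofList first) rest
            simp only [List.length_cons] at hlen
            omega
          rw [ih _ hrest]

-- ===== VERDICT (by name: the statement is the Claim_ definition above) =====
theorem reduce_circuit_spec : Claim_equal_reduce_circuit := by
  intro circuits _
  unfold Spec_reduce_circuit reduce_circuit_alt reduce_circuit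
  rw [List.length_map]
  exact (go_sync circuits.length circuits (le_refl _)).symm
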